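-- pv_equiv track=rewrite | github.com/seifely/pdpython | pdpython_model/random_network_functions.py | init_partner_list
-- ===== SOURCE A (Python) =====
-- def init_partner_list(height, width, id):
--     """ Set ID to 0 to generate the full list of all agent IDs."""
--     pardners = []
--     maxm = (height*width)+1
--     ids = list(range(1, maxm))
--     for i in ids:
--         if not i == id:
--             pardners.append(i)
--     return pardners
-- ===== SOURCE B (Python) =====
-- def init_partner_list(height, width, id):
--     """ Set ID to 0 to generate the full list of all agent IDs."""
--     maxm = (height * width) + 1
--     if 1 <= id < maxm:
--         return list(range(1, id)) + list(range(id + 1, maxm))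
--     return list(range(1, maxm))
-- ===== Notes on version B (the rewrite author's own statement) =====
-- stated objective: simpler
-- what changed: B builds the result as the concatenation of two contiguous ranges split at id (or the full range when id is outside it), removing A's per-element equality-test loop.
import Mathlib
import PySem

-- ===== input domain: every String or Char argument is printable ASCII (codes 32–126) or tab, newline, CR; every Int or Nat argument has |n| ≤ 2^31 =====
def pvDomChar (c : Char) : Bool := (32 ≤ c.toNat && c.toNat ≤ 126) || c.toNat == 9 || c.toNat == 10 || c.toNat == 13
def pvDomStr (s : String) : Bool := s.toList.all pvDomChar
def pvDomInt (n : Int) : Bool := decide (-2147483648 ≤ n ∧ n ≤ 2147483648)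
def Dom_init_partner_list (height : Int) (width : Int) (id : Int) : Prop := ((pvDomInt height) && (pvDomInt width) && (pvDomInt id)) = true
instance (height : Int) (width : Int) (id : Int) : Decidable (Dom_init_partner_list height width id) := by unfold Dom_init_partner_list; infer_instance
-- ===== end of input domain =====

-- ===== PORT A =====
-- pardners=[]; maxm=h*w+1; for i in range(1,maxm): if not i == id: pardners.append(i)
def init_partner_list (height : Int) (width : Int) (id : Int) : List Int :=
  let maxm := height * width + 1
  let ids := PySem.List.pyRange 1 maxm 1
  ids.foldl (fun pardners i => if ¬ (i == id) then pardners ++ [i] else pardners) []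

-- ===== PORT B =====
-- B: two contiguous range segments split at id; full range if id out of [1, maxm)
def init_partner_list_alt (height : Int) (width : Int) (id : Int) : List Int :=
  let maxm := height * width + 1
  if 1 ≤ id ∧ id < maxm then
    PySem.List.pyRange 1 id 1 ++ PySem.List.pyRange (id + 1) maxm 1
  else
    PySem.List.pyRange 1 maxm 1

-- ===== PRECONDITION & SPEC =====
def Spec_init_partner_list (height : Int) (width : Int) (id : Int) (out : List Int) : Prop := out = init_partner_list_alt height width id
instance (height : Int) (width : Int) (id : Int) (out : List Int) : Decidable (Spec_init_partner_list height width id out) := by unfold Spec_init_partner_list; infer_instance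

-- ===== CLAIM (what is proved, stated in full; the proofs are below) =====
def Claim_equal_init_partner_list : Prop := ∀ (height : Int) (width : Int) (id : Int), Dom_init_partner_list height width id → Spec_init_partner_list height width id (init_partner_list height width id)

-- ===== LEMMAS AND PROOFS =====

-- ===== VERDICT (by name: the statement is the Claim_ definition above) =====
lemma filter_pyRange_ne (a b id : Int) :
    (PySem.List.pyRange a b 1).filter (fun i => !decide (i = id)) =
      if a ≤ id ∧ id < b then
        PySem.List.pyRange a id 1 ++ PySem.List.pyRange (id + 1) b 1
      else PySem.List.pyRange a b 1 := by
  split_ifs with h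
  · rw [PySem.List.pyRange_one_append a id b h.1 (le_of_lt h.2),
        PySem.List.pyRange_one_cons h.2, List.filter_append, List.filter_cons]
    have hid : (!decide (id = id)) = false := by simp
    rw [hid]
    simp only [Bool.false_eq_true, if_false]
    congr 1
    · exact List.filter_eq_self.mpr (fun x hx => by
        have := (PySem.List.mem_pyRange_one.mp hx).2
        simp; omega)
    · exact List.filter_eq_self.mpr (fun x hx => by
        have := (PySem.List.mem_pyRange_one.mp hx).1
        simp; omega)
  · exact List.filter_eq_self.mpr (fun x hx => by
      have := PySem.List.mem_pyRange_one.mp hx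
      simp; omega)

theorem init_partner_list_spec : Claim_equal_init_partner_list := by
  intro height width id _
  unfold Spec_init_partner_list init_partner_list init_partner_list_alt
  simp only []
  rw [PySem.List.foldl_append_ite_eq_filter, List.nil_append]
  have hcongr : (PySem.List.pyRange 1 (height * width + 1) 1).filter
      (fun x => decide (¬(x == id) = true)) =
      (PySem.List.pyRange 1 (height * width + 1) 1).filter (fun i => !decide (i = id)) := by
    apply List.filter_congr
    intro x _
    simp
  rw [hcongr, filter_pyRange_ne]
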